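-- pv_equiv track=rewrite | github.com/danieleschmidt/meta-prompt-evolution-hub | generation_5_lightweight_research.py | _extract_style_elements
-- ===== SOURCE A (Python) =====
-- from typing import Dict, List, Any, Optional, Tuple, Union
--
-- def _extract_style_elements(text: str) -> List[str]:
--     """Extract style elements from text."""
--     style_markers = []
--     text_lower = text.lower()
--
--     style_mappings = {
--         'modern': ['clean', 'minimalist', 'contemporary'],
--         'classic': ['traditional', 'elegant', 'timeless'],
--         'bold': ['strong', 'dramatic', 'high_contrast'],
--         'subtle': ['gentle', 'soft', 'understated']
--     }
--
--     for style, markers in style_mappings.items():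
--         if style in text_lower:
--             style_markers.extend(markers)
--
--     return style_markers[:3]
-- ===== SOURCE B (Python) =====
-- def _extract_style_elements(text: str) -> list:
--     """Extract style elements from text (first matching style wins)."""
--     text_lower = text.lower()
--     style_mappings = {
--         'modern': ['clean', 'minimalist', 'contemporary'],
--         'classic': ['traditional', 'elegant', 'timeless'],
--         'bold': ['strong', 'dramatic', 'high_contrast'],
--         'subtle': ['gentle', 'soft', 'understated']
--     }
--     for style, markers in style_mappings.items():
--         if style in text_lower:
--             return markers
--     return []
-- ===== Notes on version B (the rewrite author's own statement) =====
-- stated objective: simpler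
-- what changed: Since every style contributes exactly 3 markers and the result is truncated to 3, only the first matching style matters: B returns that style's marker list directly on the first substring hit (or [] if none), dropping the accumulator list, extend and final slice entirely.
import Mathlib
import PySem

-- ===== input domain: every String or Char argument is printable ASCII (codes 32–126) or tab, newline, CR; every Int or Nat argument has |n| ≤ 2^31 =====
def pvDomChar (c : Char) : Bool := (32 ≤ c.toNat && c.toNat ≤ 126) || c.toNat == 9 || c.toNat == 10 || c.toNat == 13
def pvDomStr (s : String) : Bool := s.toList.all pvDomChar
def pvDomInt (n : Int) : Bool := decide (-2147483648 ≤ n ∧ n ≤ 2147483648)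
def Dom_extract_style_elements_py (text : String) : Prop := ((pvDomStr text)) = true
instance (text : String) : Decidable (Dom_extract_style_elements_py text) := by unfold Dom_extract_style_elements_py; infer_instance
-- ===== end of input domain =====

-- B returns the first matching style's marker list directly (no accumulator, no slice): simpler, same values.


-- ===== PORT A =====
def pvStyleMappings : List (String × List String) :=
  [("modern", ["clean", "minimalist", "contemporary"]),
   ("classic", ["traditional", "elegant", "timeless"]),
   ("bold", ["strong", "dramatic", "high_contrast"]),
   ("subtle", ["gentle", "soft", "understated"])]

def extract_style_elements_py (text : String) : List String :=
  let text_lower := PySem.Str.lower text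
  let style_markers :=
    pvStyleMappings.foldl
      (fun acc p => if PySem.Str.isIn p.1 text_lower then acc ++ p.2 else acc) []
  PySem.List.slice style_markers none (some 3)

-- ===== PORT B =====
def pvFirstStyle (text_lower : String) : List (String × List String) → List String
  | [] => []
  | (style, markers) :: rest =>
      if PySem.Str.isIn style text_lower then markers else pvFirstStyle text_lower rest

def extract_style_elements_py_alt (text : String) : List String :=
  pvFirstStyle (PySem.Str.lower text) pvStyleMappings

-- ===== PRECONDITION & SPEC =====
def Spec_extract_style_elements_py (text : String) (out : List String) : Prop := out = extract_style_elements_py_alt text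
instance (text : String) (out : List String) : Decidable (Spec_extract_style_elements_py text out) := by unfold Spec_extract_style_elements_py; infer_instance

-- ===== CLAIM (what is proved, stated in full; the proofs are below) =====
def Claim_equal_extract_style_elements_py : Prop := ∀ (text : String), Dom_extract_style_elements_py text → Spec_extract_style_elements_py text (extract_style_elements_py text)

-- ===== LEMMAS AND PROOFS =====

-- ===== VERDICT (by name: the statement is the Claim_ definition above) =====
theorem extract_style_elements_py_spec : Claim_equal_extract_style_elements_py := by
  intro text _
  unfold Spec_extract_style_elements_py extract_style_elements_py extract_style_elements_py_alt
  cases h1 : PySem.Chars.isIn ['m','o','d','e','r','n'] (PySem.Chars.lower text.toList) <;>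
  cases h2 : PySem.Chars.isIn ['c','l','a','s','s','i','c'] (PySem.Chars.lower text.toList) <;>
  cases h3 : PySem.Chars.isIn ['b','o','l','d'] (PySem.Chars.lower text.toList) <;>
  cases h4 : PySem.Chars.isIn ['s','u','b','t','l','e'] (PySem.Chars.lower text.toList) <;>
    simp [pvStyleMappings, pvFirstStyle, h1, h2, h3, h4, PySem.List.slice]
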